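-- pv_equiv track=rewrite | github.com/dotorio/TIL | algorithm_study/softeer/car_test/sol2.py | count_median
-- ===== SOURCE A (Python) =====
-- def count_median(car, mi):
--     n = len(car)
--     count = 0
--     for i in range(n):
--         for j in range(i+1, n):
--             for k in range(j+1, n):
--                 median = sorted([car[i], car[j], car[k]])[1]
--                 if median == mi:
--                     count += 1
--     return count
-- ===== SOURCE B (Python) =====
-- def count_median(car, mi):
--     # One pass: for each element, count triples in which it is the latest
--     # (by index) member, using category counts of the elements seen so far.
--     less = equal = greater = eq_pairs = 0
--     count = 0
--     for x in car:
--         if x < mi: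
--             count += equal * greater + eq_pairs
--             less += 1
--         elif x == mi:
--             count += less * greater + equal * (less + greater) + eq_pairs
--             eq_pairs += equal
--             equal += 1
--         else:
--             count += equal * less + eq_pairs
--             greater += 1
--     return count
-- ===== Notes on version B (the rewrite author's own statement) =====
-- stated objective: faster
-- what changed: Replaced the O(n^3) triple loop over index triples by a single left-to-right pass that maintains counts of elements <, =, > mi (and of equal pairs) and adds, for each element, the number of triples it completes whose median is mi.
import Mathlib
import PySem

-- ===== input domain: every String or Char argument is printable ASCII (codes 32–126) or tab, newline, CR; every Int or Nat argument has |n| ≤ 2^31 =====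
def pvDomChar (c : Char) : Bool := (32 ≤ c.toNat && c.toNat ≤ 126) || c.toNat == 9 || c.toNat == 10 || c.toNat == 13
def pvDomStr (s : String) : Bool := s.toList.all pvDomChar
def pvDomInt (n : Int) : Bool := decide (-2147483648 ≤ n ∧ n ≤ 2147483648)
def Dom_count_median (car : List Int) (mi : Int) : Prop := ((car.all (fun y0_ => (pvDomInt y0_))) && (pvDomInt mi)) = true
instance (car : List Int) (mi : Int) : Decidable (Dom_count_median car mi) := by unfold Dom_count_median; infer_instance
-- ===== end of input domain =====

-- B replaces A's O(n^3) triple loop by a single pass keeping counts of elements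
-- <, =, > mi (objective: faster, asymptotic change measured).

-- ===== PORT A =====
-- Triple nested index loop; all indices are in range, so the pyGetD default 0 is never used.
def count_median (car : List Int) (mi : Int) : Int :=
  let n : Int := PySem.List.len car
  (PySem.List.pyRange 0 n 1).foldl (fun count i =>
    (PySem.List.pyRange (i + 1) n 1).foldl (fun count j =>
      (PySem.List.pyRange (j + 1) n 1).foldl (fun count k =>
        let median := PySem.List.pyGetD
          (PySem.List.sorted
            [PySem.List.pyGetD car i 0, PySem.List.pyGetD car j 0, PySem.List.pyGetD car k 0]
            (fun v => v) false) 1 0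
        if median = mi then count + 1 else count) count) count) 0

-- ===== PORT B =====
-- One pass; state = (less, equal, greater, eq_pairs, count).
def count_median_alt (car : List Int) (mi : Int) : Int :=
  (car.foldl (fun (st : Int × Int × Int × Int × Int) x =>
      let (less, equal, greater, eq_pairs, count) := st
      if x < mi then
        (less + 1, equal, greater, eq_pairs, count + equal * greater + eq_pairs)
      else if x = mi then
        (less, equal + 1, greater, eq_pairs + equal,
          count + less * greater + equal * (less + greater) + eq_pairs)
      else
        (less, equal, greater + 1, eq_pairs, count + equal * less + eq_pairs))
    (0, 0, 0, 0, 0)).2.2.2.2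

-- ===== PRECONDITION & SPEC =====
def Spec_count_median (car : List Int) (mi : Int) (out : Int) : Prop := out = count_median_alt car mi
instance (car : List Int) (mi : Int) (out : Int) : Decidable (Spec_count_median car mi out) := by unfold Spec_count_median; infer_instance

-- ===== CLAIM (what is proved, stated in full; the proofs are below) =====
def Claim_equal_count_median : Prop := ∀ (car : List Int) (mi : Int), Dom_count_median car mi → Spec_count_median car mi (count_median car mi)

-- ===== LEMMAS AND PROOFS =====

-- Category counts of a list relative to mi.
def cL (mi : Int) (xs : List Int) : Nat := xs.countP (fun z => decide (z < mi))
def cE (mi : Int) (xs : List Int) : Nat := xs.countP (fun z => decide (z = mi))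
def cG (mi : Int) (xs : List Int) : Nat := xs.countP (fun z => decide (mi < z))

-- Closed form: number of triples with median mi among a multiset with counts (l, e, g).
def Fm (l e g : Nat) : Int :=
  (l : Int) * e * g + (e.choose 2 : Int) * ((l : Int) + g) + (e.choose 3 : Int)

-- The median expression of port A, and its arithmetic value.
def medE (x y z : Int) : Int :=
  PySem.List.pyGetD (PySem.List.sorted [x, y, z] (fun v => v) false) 1 0

theorem medE_eq (x y z : Int) : medE x y z = max (min x y) (min (max x y) z) := by
  unfold medE
  simp only [PySem.List.sorted_eq_foldl_insertBy, List.foldl, PySem.List.insertBy]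
  split_ifs <;>
    simp_all [PySem.List.insertBy, PySem.List.pyGetD, PySem.List.pyGet?, PySem.List.pyIdx?] <;>
    split_ifs <;> simp_all <;> omega

-- Structural forms of A's three loops.
def innerGo (mi x y : Int) (t : List Int) (c : Int) : Int :=
  t.foldl (fun c z => if medE x y z = mi then c + 1 else c) c

def midGo (mi x : Int) : List Int → Int → Int
  | [], c => c
  | y :: t, c => midGo mi x t (innerGo mi x y t c)

def outGo (mi : Int) : List Int → Int → Int
  | [], c => c
  | x :: t, c => outGo mi t (midGo mi x t c)

theorem innerGo_eq (mi x y : Int) (t : List Int) (c : Int) :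
    innerGo mi x y t c = c + (t.countP (fun z => decide (medE x y z = mi)) : Int) := by
  induction t generalizing c with
  | nil => simp [innerGo]
  | cons z t ih =>
    simp only [innerGo, List.foldl_cons, List.countP_cons] at *
    rw [ih]
    split_ifs <;> simp only [decide_eq_true_eq] at * <;> omega

-- pair count contributed by a first element x against a tail t
def pairCnt (mi x : Int) (t : List Int) : Int :=
  if x < mi then (cE mi t : Int) * cG mi t + ((cE mi t).choose 2 : Int)
  else if x = mi then
    (cL mi t : Int) * cG mi t + (cE mi t : Int) * ((cL mi t : Int) + cG mi t)
      + ((cE mi t).choose 2 : Int)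
  else (cL mi t : Int) * cE mi t + ((cE mi t).choose 2 : Int)

theorem med_mi_iff (mi x y z : Int) : medE x y z = mi ↔
    ((x = mi ∨ y = mi ∨ z = mi) ∧ ¬(x < mi ∧ y < mi) ∧ ¬(x < mi ∧ z < mi) ∧ ¬(y < mi ∧ z < mi)
      ∧ ¬(mi < x ∧ mi < y) ∧ ¬(mi < x ∧ mi < z) ∧ ¬(mi < y ∧ mi < z)) := by
  rw [medE_eq]; simp only [min_def, max_def]; split_ifs <;> omega

theorem countP_ge (mi : Int) (t : List Int) :
    t.countP (fun z => decide (mi ≤ z)) = cE mi t + cG mi t := by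
  induction t with
  | nil => simp [cE, cG]
  | cons y t ih =>
    simp only [cE, cG, List.countP_cons] at ih ⊢
    rw [ih]; split_ifs <;> simp only [decide_eq_true_eq] at * <;> omega

theorem countP_le (mi : Int) (t : List Int) :
    t.countP (fun z => decide (z ≤ mi)) = cL mi t + cE mi t := by
  induction t with
  | nil => simp [cL, cE]
  | cons y t ih =>
    simp only [cL, cE, List.countP_cons] at ih ⊢
    rw [ih]; split_ifs <;> simp only [decide_eq_true_eq] at * <;> omega

theorem len_split (mi : Int) (t : List Int) :
    t.length = cL mi t + cE mi t + cG mi t := by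
  induction t with
  | nil => simp [cL, cE, cG]
  | cons y t ih =>
    simp only [cL, cE, cG, List.countP_cons, List.length_cons] at ih ⊢
    rw [ih]; split_ifs <;> simp only [decide_eq_true_eq] at * <;> omega

theorem cnt_cases (mi x y : Int) (t : List Int) :
    t.countP (fun z => decide (medE x y z = mi)) =
      (if x < mi then (if y < mi then 0 else if y = mi then cE mi t + cG mi t else cE mi t)
       else if x = mi then
         (if y < mi then cE mi t + cG mi t else if y = mi then t.length else cL mi t + cE mi t)
       else (if y < mi then cE mi t else if y = mi then cL mi t + cE mi t else 0)) := by
  split_ifs <;>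
  · first
    | (rw [show (0 : Nat) = t.countP (fun _ => false) by simp]; apply List.countP_congr;
        intro z _; simp [med_mi_iff]; omega)
    | (rw [← countP_ge]; apply List.countP_congr; intro z _; simp [med_mi_iff]; omega)
    | (rw [← countP_le]; apply List.countP_congr; intro z _; simp [med_mi_iff]; omega)
    | (rw [show cE mi t = t.countP (fun z => decide (z = mi)) from rfl];
        apply List.countP_congr; intro z _; simp [med_mi_iff]; omega)
    | (rw [show t.length = t.countP (fun _ => true) by simp]; apply List.countP_congr;
        intro z _; simp [med_mi_iff]; omega)

theorem choose2_succ (e : Nat) : (((e + 1).choose 2 : Nat) : Int) = (e.choose 2 : Int) + e := by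
  have : (e + 1).choose 2 = e.choose 2 + e := by
    simp [Nat.choose_succ_succ]; omega
  rw [this]; push_cast; ring

theorem choose3_succ (e : Nat) : (((e + 1).choose 3 : Nat) : Int) = (e.choose 3 : Int) + e.choose 2 := by
  have : (e + 1).choose 3 = e.choose 3 + e.choose 2 := by
    simp [Nat.choose_succ_succ]; omega
  rw [this]; push_cast; ring

theorem cL_cons (mi y : Int) (t : List Int) :
    cL mi (y :: t) = (if y < mi then 1 else 0) + cL mi t := by
  simp only [cL, List.countP_cons]; split_ifs <;> simp only [decide_eq_true_eq] at * <;> omega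

theorem cE_cons (mi y : Int) (t : List Int) :
    cE mi (y :: t) = (if y = mi then 1 else 0) + cE mi t := by
  simp only [cE, List.countP_cons]; split_ifs <;> simp only [decide_eq_true_eq] at * <;> omega

theorem cG_cons (mi y : Int) (t : List Int) :
    cG mi (y :: t) = (if mi < y then 1 else 0) + cG mi t := by
  simp only [cG, List.countP_cons]; split_ifs <;> simp only [decide_eq_true_eq] at * <;> omega

theorem midGo_eq (mi x : Int) (t : List Int) (c : Int) :
    midGo mi x t c = c + pairCnt mi x t := by
  induction t generalizing c with
  | nil => unfold midGo pairCnt; simp [cL, cE, cG]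
  | cons y t ih =>
    unfold midGo
    rw [ih, innerGo_eq, cnt_cases]
    unfold pairCnt
    rw [cL_cons, cE_cons, cG_cons]
    rcases lt_trichotomy x mi with hx | hx | hx <;>
      rcases lt_trichotomy y mi with hy | hy | hy <;>
      simp only [hx, hy, if_pos, if_neg, lt_irrefl] <;>
      split_ifs <;> (try contradiction) <;> (try omega) <;>
      (try simp only [Nat.add_comm 1]) <;>
      (try rw [len_split mi t]) <;>
      (first
        | (push_cast [choose2_succ]; ring)
        | (push_cast; ring)
        | omega)

theorem outGo_eq (mi : Int) (xs : List Int) (c : Int) :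
    outGo mi xs c = c + Fm (cL mi xs) (cE mi xs) (cG mi xs) := by
  induction xs generalizing c with
  | nil => unfold outGo Fm; simp [cL, cE, cG]
  | cons x t ih =>
    unfold outGo
    rw [ih, midGo_eq, cL_cons, cE_cons, cG_cons]
    unfold pairCnt Fm
    rcases lt_trichotomy x mi with hx | hx | hx <;>
      simp only [hx, if_pos, if_neg, lt_irrefl] <;>
      split_ifs <;> (try contradiction) <;> (try omega) <;>
      (try simp only [Nat.add_comm 1]) <;>
      (first
        | (push_cast [choose2_succ, choose3_succ]; ring)
        | (push_cast; ring)
        | omega)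

theorem mid_loop (car : List Int) (mi x : Int) :
    ∀ (fuel : Nat) (a c : Int), 0 ≤ a → car.length ≤ a.toNat + fuel →
    (PySem.List.pyRange a (PySem.List.len car) 1).foldl
      (fun count j =>
        (PySem.List.pyRange (j + 1) (PySem.List.len car) 1).foldl
          (fun count k =>
            let median := PySem.List.pyGetD
              (PySem.List.sorted
                [x, PySem.List.pyGetD car j 0, PySem.List.pyGetD car k 0]
                (fun v => v) false) 1 0
            if median = mi then count + 1 else count) count) c
    = midGo mi x (car.drop a.toNat) c := by
  intro fuel
  induction fuel with
  | zero =>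
    intro a c ha hlen
    rw [List.drop_eq_nil_of_le (by omega), PySem.List.pyRange_one_eq_nil (by simp; omega)]
    simp [midGo]
  | succ fuel ih =>
    intro a c ha hlen
    by_cases h : car.length ≤ a.toNat
    · rw [List.drop_eq_nil_of_le (by omega), PySem.List.pyRange_one_eq_nil (by simp; omega)]
      simp [midGo]
    · push_neg at h
      rw [PySem.List.pyRange_one_cons (by simp; omega), List.foldl_cons,
        List.drop_eq_getElem_cons h]
      have hin : (PySem.List.pyRange (a + 1) (PySem.List.len car) 1).foldl
          (fun count k =>
            let median := PySem.List.pyGetD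
              (PySem.List.sorted
                [x, PySem.List.pyGetD car a 0, PySem.List.pyGetD car k 0]
                (fun v => v) false) 1 0
            if median = mi then count + 1 else count) c
          = innerGo mi x (PySem.List.pyGetD car a 0) (car.drop (a + 1).toNat) c := by
        have := PySem.List.foldl_pyRange_pyGetD (xs := car) (d := 0)
          (f := fun c z => if medE x (PySem.List.pyGetD car a 0) z = mi then c + 1 else c)
          (init := c) (a := a + 1) (by omega)
        simpa [innerGo, medE] using this
      rw [hin, ih (a + 1) _ (by omega) (by omega)]
      rw [PySem.List.pyGetD_eq_getElem (xs := car) (i := a) (d := 0) (by omega)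
        (by first | omega | (simp only [PySem.List.len_eq]; omega))]
      have : (a + 1).toNat = a.toNat + 1 := by omega
      rw [this, midGo]

theorem out_loop (car : List Int) (mi : Int) :
    ∀ (fuel : Nat) (a c : Int), 0 ≤ a → car.length ≤ a.toNat + fuel →
    (PySem.List.pyRange a (PySem.List.len car) 1).foldl
      (fun count i =>
        (PySem.List.pyRange (i + 1) (PySem.List.len car) 1).foldl
          (fun count j =>
            (PySem.List.pyRange (j + 1) (PySem.List.len car) 1).foldl
              (fun count k =>
                let median := PySem.List.pyGetD
                  (PySem.List.sorted
                    [PySem.List.pyGetD car i 0, PySem.List.pyGetD car j 0,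
                      PySem.List.pyGetD car k 0]
                    (fun v => v) false) 1 0
                if median = mi then count + 1 else count) count) count) c
    = outGo mi (car.drop a.toNat) c := by
  intro fuel
  induction fuel with
  | zero =>
    intro a c ha hlen
    rw [List.drop_eq_nil_of_le (by omega), PySem.List.pyRange_one_eq_nil (by simp; omega)]
    simp [outGo]
  | succ fuel ih =>
    intro a c ha hlen
    by_cases h : car.length ≤ a.toNat
    · rw [List.drop_eq_nil_of_le (by omega), PySem.List.pyRange_one_eq_nil (by simp; omega)]
      simp [outGo]
    · push_neg at h
      rw [PySem.List.pyRange_one_cons (by simp; omega), List.foldl_cons,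
        List.drop_eq_getElem_cons h]
      rw [mid_loop car mi (PySem.List.pyGetD car a 0) (car.length - a.toNat) (a + 1) _
        (by omega) (by omega)]
      rw [ih (a + 1) _ (by omega) (by omega)]
      rw [PySem.List.pyGetD_eq_getElem (xs := car) (i := a) (d := 0) (by omega)
        (by first | omega | (simp only [PySem.List.len_eq]; omega))]
      have : (a + 1).toNat = a.toNat + 1 := by omega
      rw [this, outGo]

theorem count_median_eq_outGo (car : List Int) (mi : Int) :
    count_median car mi = outGo mi car 0 := by
  have := out_loop car mi car.length 0 0 (by omega) (by omega)
  simpa [count_median] using this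

theorem alt_inv (mi : Int) (xs : List Int) : ∀ (l e g : Nat) (c : Int),
    (xs.foldl (fun (st : Int × Int × Int × Int × Int) x =>
      let (less, equal, greater, eq_pairs, count) := st
      if x < mi then
        (less + 1, equal, greater, eq_pairs, count + equal * greater + eq_pairs)
      else if x = mi then
        (less, equal + 1, greater, eq_pairs + equal,
          count + less * greater + equal * (less + greater) + eq_pairs)
      else
        (less, equal, greater + 1, eq_pairs, count + equal * less + eq_pairs))
      ((l : Int), (e : Int), (g : Int), (e.choose 2 : Int), c)).2.2.2.2
    = c + Fm (l + cL mi xs) (e + cE mi xs) (g + cG mi xs) - Fm l e g := by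
  induction xs with
  | nil => intro l e g c; simp [cL, cE, cG]
  | cons x t ih =>
    intro l e g c
    rw [List.foldl_cons]
    simp only []
    split_ifs with hx he
    · rw [show ((l : Int) + 1) = ((l + 1 : Nat) : Int) by push_cast; ring,
        ih (l + 1) e g _, cL_cons, cE_cons, cG_cons,
        if_pos hx, if_neg (by omega : ¬ x = mi), if_neg (by omega : ¬ mi < x),
        show l + (1 + cL mi t) = l + 1 + cL mi t from by omega,
        show e + (0 + cE mi t) = e + cE mi t from by omega,
        show g + (0 + cG mi t) = g + cG mi t from by omega]
      unfold Fm; push_cast; ring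
    · rw [show ((e : Int) + 1) = ((e + 1 : Nat) : Int) by push_cast; ring,
        show ((e.choose 2 : Nat) : Int) + e = (((e + 1).choose 2 : Nat) : Int) by
          rw [choose2_succ],
        ih l (e + 1) g _, cL_cons, cE_cons, cG_cons,
        if_neg hx, if_pos he, if_neg (by omega : ¬ mi < x),
        show l + (0 + cL mi t) = l + cL mi t from by omega,
        show e + (1 + cE mi t) = e + 1 + cE mi t from by omega,
        show g + (0 + cG mi t) = g + cG mi t from by omega]
      unfold Fm; push_cast [choose2_succ, choose3_succ]; ring
    · rw [show ((g : Int) + 1) = ((g + 1 : Nat) : Int) by push_cast; ring,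
        ih l e (g + 1) _, cL_cons, cE_cons, cG_cons,
        if_neg hx, if_neg he, if_pos (by omega : mi < x),
        show l + (0 + cL mi t) = l + cL mi t from by omega,
        show e + (0 + cE mi t) = e + cE mi t from by omega,
        show g + (1 + cG mi t) = g + 1 + cG mi t from by omega]
      unfold Fm; push_cast; ring

-- ===== VERDICT (by name: the statement is the Claim_ definition above) =====
theorem count_median_spec : Claim_equal_count_median := by
  intro car mi _
  unfold Spec_count_median
  rw [count_median_eq_outGo, outGo_eq]
  unfold count_median_alt
  have h := alt_inv mi car 0 0 0 0
  simp only [Nat.cast_zero, Nat.choose_self] at h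
  norm_num at h ⊢
  rw [h]
  simp [Fm]
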